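-- pv_equiv track=rewrite | github.com/UlrichBerntien/Codewars-Katas | 7_kyu/Array_element_parity.py | solve
-- ===== SOURCE A (Python) =====
-- from typing import Iterable, Mapping
--
-- def sgn(x: int) -> int:
--     """Return 1 if negative, 2 if positive"""
--     return int(x>=0)+1
--
-- def solve(arr: Iterable[int]) -> int:
--     # Map from absolute value to bits in an int coding the signs
--     hash: Mapping[int,int] = {}
--     # store the signs as bits in a hash table
--     for it in arr:
--         key = abs(it)
--         hash[key] = hash.get(key,0) | sgn(it)
--     # search the first not +/- item in the hash table
--     for key, signs in hash.items():
--         if  signs < 3: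
--             return key if signs == 2 else -key
--     # error
--     raise ValueError('all paired')
-- ===== SOURCE B (Python) =====
-- from typing import Iterable
--
-- def solve(arr: Iterable[int]) -> int:
--     xs = list(arr)
--     present = set(xs)
--     for x in xs:
--         if x == 0 or -x not in present:
--             return x
--     raise ValueError('all paired')
-- ===== Notes on version B (the rewrite author's own statement) =====
-- stated objective: simpler
-- what changed: B scans the original sequence once against a plain presence set (x is unpaired iff x==0 or -x absent), instead of building a per-absolute-value sign-bitmask dict and then scanning the dict's items.
import Mathlib
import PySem

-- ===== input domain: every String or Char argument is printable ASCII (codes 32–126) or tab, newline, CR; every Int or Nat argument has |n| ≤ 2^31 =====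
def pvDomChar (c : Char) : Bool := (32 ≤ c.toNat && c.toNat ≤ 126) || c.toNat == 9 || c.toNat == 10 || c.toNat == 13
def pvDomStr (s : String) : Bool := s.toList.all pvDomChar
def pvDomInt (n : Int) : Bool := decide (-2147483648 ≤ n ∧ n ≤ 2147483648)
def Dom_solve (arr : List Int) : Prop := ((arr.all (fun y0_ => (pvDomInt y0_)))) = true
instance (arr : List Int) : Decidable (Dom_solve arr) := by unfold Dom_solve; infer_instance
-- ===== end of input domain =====

-- B replaces A's per-absolute-value sign-bitmask dict (built, then its items scanned)
-- by a single scan of the original sequence against a plain presence set (simpler).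

-- ===== PORT A =====
def sgnA (x : Int) : Int := (if 0 ≤ x then 1 else 0) + 1

def buildA (arr : List Int) : PySem.Dict Int Int :=
  arr.foldl (fun d it => d.insert |it| (PySem.Int.bor (d.getD |it| 0) (sgnA it))) PySem.Dict.empty

def scanA : List (Int × Int) → Option Int
  | [] => none
  | (key, signs) :: rest =>
      if signs < 3 then some (if signs = 2 then key else -key) else scanA rest

-- A raises ValueError('all paired') when the scan finds nothing; Pre_solve excludes those inputs.
def solve (arr : List Int) : Int := (scanA (buildA arr).items).getD 0

-- ===== PORT B =====
def findUnpairedB (s : PySem.Set Int) : List Int → Option Int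
  | [] => none
  | x :: rest =>
      if x == 0 || !(PySem.Set.contains s (-x)) then some x else findUnpairedB s rest

-- B raises ValueError('all paired') when the loop finds nothing; Pre_solve excludes those inputs.
def solve_alt (arr : List Int) : Int :=
  (findUnpairedB (PySem.Set.ofList arr) arr).getD 0

-- ===== PRECONDITION & SPEC =====
-- Pre_ excludes exactly the inputs on which A (and B) raise ValueError('all paired'):
-- those where every element has its sign-opposite present (and no zero occurs).
def Pre_solve (arr : List Int) : Prop := ∃ x ∈ arr, x = 0 ∨ (-x) ∉ arr
instance (arr : List Int) : Decidable (Pre_solve arr) := by unfold Pre_solve; infer_instance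
def pvWitness_solve : List Int := [1]

def Spec_solve (arr : List Int) (out : Int) : Prop := out = solve_alt arr
instance (arr : List Int) (out : Int) : Decidable (Spec_solve arr out) := by unfold Spec_solve; infer_instance

-- ===== CLAIM (what is proved, stated in full; the proofs are below) =====
def Claim_equal_solve : Prop := ∀ (arr : List Int), Dom_solve arr → Pre_solve arr → Spec_solve arr (solve arr)

-- ===== LEMMAS AND PROOFS =====

-- value accumulated by A's building loop at key k
def valOf (l : List Int) (k : Int) : Int :=
  l.foldl (fun a it => if |it| = k then PySem.Int.bor a (sgnA it) else a) 0

theorem getD_buildA (l : List Int) (d : PySem.Dict Int Int) (k : Int) :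
    (l.foldl (fun d it => d.insert |it| (PySem.Int.bor (d.getD |it| 0) (sgnA it))) d).getD k 0
      = l.foldl (fun a it => if |it| = k then PySem.Int.bor a (sgnA it) else a) (d.getD k 0) := by
  induction l generalizing d with
  | nil => rfl
  | cons x l ih =>
      rw [List.foldl_cons, List.foldl_cons, ih, PySem.Dict.getD_insert]
      by_cases h : k = |x|
      · subst h; simp
      · rw [if_neg h, if_neg (fun hh => h (Eq.symm hh))]

theorem valOf_eq (l : List Int) (k : Int) :
    valOf l k = (if l.any (fun y => decide (|y| = k ∧ 0 ≤ y)) then 2 else 0)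
              + (if l.any (fun y => decide (|y| = k ∧ y < 0)) then 1 else 0) := by
  induction l using List.reverseRecOn with
  | nil => rfl
  | append_singleton l x ih =>
      simp only [valOf, List.foldl_append, List.foldl_cons, List.foldl_nil,
        List.any_append, List.any_cons, List.any_nil] at *
      rw [ih]
      by_cases hk : |x| = k
      · by_cases hx : 0 ≤ x <;>
          rcases hb : l.any (fun y => decide (|y| = k ∧ 0 ≤ y)) <;>
          rcases hc : l.any (fun y => decide (|y| = k ∧ y < 0)) <;>
          simp [hk, hx, sgnA, PySem.Int.bor] <;> omega
      · simp [hk]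

theorem scanA_map (v : Int → Int) (ks : List Int) :
    scanA (ks.map (fun k => (k, v k)))
      = (ks.find? (fun k => decide (v k < 3))).map (fun k => if v k = 2 then k else -k) := by
  induction ks with
  | nil => rfl
  | cons k ks ih =>
      simp only [List.map_cons, scanA, List.find?_cons]
      by_cases h : v k < 3 <;> simp [h, ih]

theorem find?_discard (q : Int → Bool) (s : List Int) (x : Int) (hx : q x = false) :
    (PySem.Set.discard s x).find? q = s.find? q := by
  induction s with
  | nil => rfl
  | cons y s ih =>
      by_cases h : y = x
      · simp [PySem.Set.discard, h, hx, List.find?_cons, ← ih, PySem.Set.discard]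
      · simp only [PySem.Set.discard] at *
        simp only [List.filter_cons, List.find?_cons]
        rcases hq : q y with _ | _
        · simp [h, hq, List.find?_cons, ← ih]
        · simp [h, hq, List.find?_cons]

theorem find?_ofList (q : Int → Bool) (l : List Int) :
    (PySem.Set.ofList l).find? q = l.find? q := by
  induction l with
  | nil => rfl
  | cons x l ih =>
      rw [PySem.Set.ofList_cons, List.find?_cons, List.find?_cons]
      rcases hq : q x with _ | _
      · rw [find?_discard q _ x hq, ih]
      · rfl

theorem findUnpairedB_eq_find? (s : PySem.Set Int) (l : List Int) :
    findUnpairedB s l = l.find? (fun x => x == 0 || !(PySem.Set.contains s (-x))) := by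
  induction l with
  | nil => rfl
  | cons x l ih =>
      rw [findUnpairedB, List.find?_cons]
      rcases h : (x == 0 || !(PySem.Set.contains s (-x))) with _ | _ <;>
        simp only [PySem.Set.contains_eq_listContains, List.contains_eq_mem] at h <;>
        simp [h, ih]

-- the two find? scans agree element by element on members of arr
theorem pred_equiv (arr : List Int) (y : Int) (hy : y ∈ arr) :
    (decide (valOf arr |y| < 3)
      = (y == 0 || !(PySem.Set.contains (PySem.Set.ofList arr) (-y))))
    ∧ (valOf arr |y| < 3 → (if valOf arr |y| = 2 then |y| else -|y|) = y) := by
  have hmem : PySem.Set.contains (PySem.Set.ofList arr) (-y) = decide ((-y) ∈ arr) := by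
    simp [PySem.Set.contains_eq_listContains, List.contains_eq_mem, PySem.Set.mem_ofList]
  rw [hmem, valOf_eq]
  rcases (by omega : 0 ≤ y ∨ y < 0) with hy0 | hy0
  · have hb : arr.any (fun z => decide (|z| = |y| ∧ 0 ≤ z)) = true := by
      simp only [List.any_eq_true]
      exact ⟨y, hy, by simp [hy0]⟩
    have hc : arr.any (fun z => decide (|z| = |y| ∧ z < 0)) = true ↔ ((-y) ∈ arr ∧ y ≠ 0) := by
      simp only [List.any_eq_true, decide_eq_true_eq]
      constructor
      · rintro ⟨z, hz, haz, hz0⟩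
        have : z = -y := by rw [abs_of_nonneg hy0] at haz; rw [abs_of_neg hz0] at haz; omega
        exact ⟨this ▸ hz, by omega⟩
      · rintro ⟨hmy, hne⟩
        exact ⟨-y, hmy, by rw [abs_of_nonneg hy0, abs_of_neg (by omega)]; omega, by omega⟩
    rw [hb]
    constructor
    · rcases hc' : arr.any (fun z => decide (|z| = |y| ∧ z < 0)) with _ | _
      · have : ¬ ((-y) ∈ arr ∧ y ≠ 0) := fun h => by rw [hc.mpr h] at hc'; cases hc'
        by_cases h0 : y = 0
        · simp [h0]
        · simp only [if_true, if_false]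
          have : (-y) ∉ arr := fun h => this ⟨h, h0⟩
          simp [h0, this]
      · have := hc.mp hc'
        simp only [if_true]
        have h1 : ¬ ((2:Int) + 1 < 3) := by omega
        simp [h1, this.1, this.2]
    · intro hlt
      rcases hc' : arr.any (fun z => decide (|z| = |y| ∧ z < 0)) with _ | _
      · simp [abs_of_nonneg hy0]
      · rw [hc'] at hlt; simp at hlt
  · have hc : arr.any (fun z => decide (|z| = |y| ∧ z < 0)) = true := by
      simp only [List.any_eq_true]
      exact ⟨y, hy, by simp [hy0]⟩
    have hb : arr.any (fun z => decide (|z| = |y| ∧ 0 ≤ z)) = true ↔ ((-y) ∈ arr) := by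
      simp only [List.any_eq_true, decide_eq_true_eq]
      constructor
      · rintro ⟨z, hz, haz, hz0⟩
        have : z = -y := by rw [abs_of_neg hy0] at haz; rw [abs_of_nonneg hz0] at haz; omega
        exact this ▸ hz
      · intro hmy
        exact ⟨-y, hmy, by rw [abs_of_neg hy0, abs_of_nonneg (by omega)], by omega⟩
    rw [hc]
    constructor
    · rcases hb' : arr.any (fun z => decide (|z| = |y| ∧ 0 ≤ z)) with _ | _
      · have hny : (-y) ∉ arr := fun h => by rw [hb.mpr h] at hb'; cases hb'
        simp only [if_false, if_true]
        have h0 : ¬ (y = 0) := by omega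
        simp [h0, hny]
      · have := hb.mp hb'
        simp only [if_true]
        have h1 : ¬ ((2:Int) + 1 < 3) := by omega
        have h0 : ¬ (y = 0) := by omega
        simp [h1, h0, this]
    · intro hlt
      rcases hb' : arr.any (fun z => decide (|z| = |y| ∧ 0 ≤ z)) with _ | _
      · have : ¬ ((0:Int) + 1 = 2) := by omega
        simp [this, abs_of_neg hy0]
      · rw [hb'] at hlt; simp at hlt

theorem find?_agree (arr : List Int) (l : List Int) (hl : ∀ y ∈ l, y ∈ arr) :
    (l.find? (fun y => decide (valOf arr |y| < 3))).map (fun y => if valOf arr |y| = 2 then |y| else -|y|)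
      = l.find? (fun x => x == 0 || !(PySem.Set.contains (PySem.Set.ofList arr) (-x))) := by
  induction l with
  | nil => rfl
  | cons y l ih =>
      have hy := hl y (by simp)
      obtain ⟨heq, hval⟩ := pred_equiv arr y hy
      rw [List.find?_cons, List.find?_cons, ← heq]
      rcases hq : decide (valOf arr |y| < 3) with _ | _
      · exact ih (fun z hz => hl z (by simp [hz]))
      · simp [hval (by simpa using hq)]

-- the abs-key map through ofList/find?: A's whole pipeline as a find? over arr
theorem solve_eq_find? (arr : List Int) :
    solve arr = ((arr.find? (fun y => decide (valOf arr |y| < 3))).map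
        (fun y => if valOf arr |y| = 2 then |y| else -|y|)).getD 0 := by
  have hnodup : (buildA arr).keys.Nodup := by
    exact PySem.Dict.nodup_keys_foldl_insert_key arr (fun it => |it|) _ _ PySem.Dict.nodup_keys_empty
  have hkeys : (buildA arr).keys = PySem.Set.ofList (arr.map (fun it => |it|)) := by
    rw [buildA, PySem.Dict.keys_foldl_insert_key]
    simp [PySem.Set.update_nil_left, PySem.Dict.keys_empty]
  have hitems : (buildA arr).items = (buildA arr).keys.map (fun k => (k, (buildA arr).getD k 0)) :=
    PySem.Dict.items_eq_map_keys _ hnodup 0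
  have hval : ∀ k, (buildA arr).getD k 0 = valOf arr k := by
    intro k
    rw [buildA, getD_buildA]
    simp [PySem.Dict.getD_empty, valOf]
  have hmapcong : ((buildA arr).keys.map (fun k => (k, (buildA arr).getD k 0)))
      = (buildA arr).keys.map (fun k => (k, valOf arr k)) := by
    exact List.map_congr_left (fun k _ => by rw [hval k])
  rw [solve, hitems, hmapcong, scanA_map, hkeys, find?_ofList, List.find?_map]
  rcases h : arr.find? (fun y => decide (valOf arr |y| < 3)) with _ | y
  · have : arr.find? ((fun k => decide (valOf arr k < 3)) ∘ fun it => |it|) = none := by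
      rw [List.find?_eq_none] at h ⊢
      exact fun x hx => h x hx
    rw [this]; rfl
  · have : arr.find? ((fun k => decide (valOf arr k < 3)) ∘ fun it => |it|) = some y := by
      rw [← h]; rfl
    rw [this]
    simp

-- ===== VERDICT (by name: the statement is the Claim_ definition above) =====
theorem solve_spec : Claim_equal_solve := by
  intro arr _ _
  unfold Spec_solve
  rw [solve_eq_find?, solve_alt, findUnpairedB_eq_find?, find?_agree arr arr (fun _ h => h)]
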